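-- pv_equiv track=rewrite | github.com/chuoer47/AlgorithmLearning | 刷题记录/LeetCode/周赛/第438场周赛/判断操作后字符串中的数字是否相等 II.py | comb_mod10
-- ===== SOURCE A (Python) =====
-- def comb_mod10(n: int, m: int) -> int:
--     # 傻逼题目非要mod10 给个质数会死啊
--     if m < 0 or m > n:
--         return 0
--     if m == 0:
--         return 1
--
--     def mod2(n: int, m: int) -> int:
--         return 1 if (n & m) == m else 0
--
--     # 使用Lucas定理
--     def mod5(n: int, m: int) -> int:
--         # 抄的
--         mod5_table = [
--             [1, 0, 0, 0, 0],  # a=0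
--             [1, 1, 0, 0, 0],  # a=1
--             [1, 2, 1, 0, 0],  # a=2
--             [1, 3, 3, 1, 0],  # a=3
--             [1, 4, 1, 4, 1],  # a=4
--         ]
--         result = 1
--         while n > 0 or m > 0:
--             ni = n % 5  # 当前五进制位
--             mi = m % 5
--             if mi > ni:  # 若某一位 m > n，结果为0
--                 return 0
--             result = (result * mod5_table[ni][mi]) % 5
--             n //= 5
--             m //= 5
--         return result
--
--     a = mod2(n, m)
--     b = mod5(n, m)
--     return (5 * ((a - b) % 2) + b) % 10
-- ===== SOURCE B (Python) =====
-- import math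
--
-- def comb_mod10(n: int, m: int) -> int:
--     if m < 0 or m > n:
--         return 0
--     if m == 0:
--         return 1
--     return math.comb(n, m) % 10
-- ===== Notes on version B (the rewrite author's own statement) =====
-- stated objective: simpler
-- what changed: Replaces the hand-rolled Lucas-theorem computation mod 2 and mod 5 plus CRT recombination with a single exact math.comb(n, m) % 10 behind the same two guards.
import Mathlib
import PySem

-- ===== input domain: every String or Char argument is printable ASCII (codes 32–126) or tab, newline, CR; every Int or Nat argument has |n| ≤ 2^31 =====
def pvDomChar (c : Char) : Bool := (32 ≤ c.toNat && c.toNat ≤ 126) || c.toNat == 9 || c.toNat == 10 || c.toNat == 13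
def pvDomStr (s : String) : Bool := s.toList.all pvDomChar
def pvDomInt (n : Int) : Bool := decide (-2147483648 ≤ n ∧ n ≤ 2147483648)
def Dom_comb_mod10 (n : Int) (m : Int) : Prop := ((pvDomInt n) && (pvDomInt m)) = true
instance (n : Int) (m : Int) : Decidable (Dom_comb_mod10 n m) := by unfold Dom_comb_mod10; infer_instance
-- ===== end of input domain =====

-- B replaces A's Lucas-theorem (mod 2 / mod 5 + CRT) computation by a direct exact binomial
-- coefficient followed by a single modulo, behind the same two guards (objective: simpler).


-- ===== PORT A =====
-- helper mod2: `1 if (n & m) == m else 0`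
def pvMod2 (n : Int) (m : Int) : Int :=
  if PySem.Int.band n m = m then 1 else 0

def pvMod5Table : List (List Int) :=
  [[1, 0, 0, 0, 0], [1, 1, 0, 0, 0], [1, 2, 1, 0, 0], [1, 3, 3, 1, 0], [1, 4, 1, 4, 1]]

-- the `while n > 0 or m > 0` loop of mod5, with its `result` accumulator
-- (indices ni, mi are Python's n % 5 / m % 5, always in [0,5), so in-range indexing is exact)
def pvMod5Go (n : Int) (m : Int) (result : Int) : Int :=
  if _h : n > 0 ∨ m > 0 then
    let ni := PySem.Int.mod n 5
    let mi := PySem.Int.mod m 5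
    if mi > ni then 0
    else
      pvMod5Go (PySem.Int.floordiv n 5) (PySem.Int.floordiv m 5)
        (PySem.Int.mod (result * (PySem.List.pyGetD (PySem.List.pyGetD pvMod5Table ni []) mi 0)) 5)
  else result
termination_by n.toNat + m.toNat
decreasing_by
  have h5 : (0:Int) < 5 := by norm_num
  rw [PySem.Int.floordiv_eq_ediv_of_pos h5, PySem.Int.floordiv_eq_ediv_of_pos h5]
  omega

def pvMod5 (n : Int) (m : Int) : Int := pvMod5Go n m 1

def comb_mod10 (n : Int) (m : Int) : Int :=
  if m < 0 ∨ m > n then 0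
  else if m = 0 then 1
  else
    let a := pvMod2 n m
    let b := pvMod5 n m
    PySem.Int.mod (5 * PySem.Int.mod (a - b) 2 + b) 10

-- ===== PORT B =====
-- math.comb(n, m) ported as Nat.choose (the guard guarantees 0 ≤ m ≤ n here)
def comb_mod10_alt (n : Int) (m : Int) : Int :=
  if m < 0 ∨ m > n then 0
  else if m = 0 then 1
  else PySem.Int.mod ((Nat.choose n.toNat m.toNat : Nat) : Int) 10

-- ===== PRECONDITION & SPEC =====
def Spec_comb_mod10 (n : Int) (m : Int) (out : Int) : Prop := out = comb_mod10_alt n m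
instance (n : Int) (m : Int) (out : Int) : Decidable (Spec_comb_mod10 n m out) := by unfold Spec_comb_mod10; infer_instance

-- ===== CLAIM (what is proved, stated in full; the proofs are below) =====
def Claim_equal_comb_mod10 : Prop := ∀ (n : Int) (m : Int), Dom_comb_mod10 n m → Spec_comb_mod10 n m (comb_mod10 n m)

-- ===== LEMMAS AND PROOFS =====

-- one binary-digit step of the `n & m == m` test
theorem land_step (N M : Nat) : (N &&& M = M) ↔ (M % 2 ≤ N % 2 ∧ N / 2 &&& M / 2 = M / 2) := by
  constructor
  · intro h
    refine ⟨?_, ?_⟩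
    · have h0 := congrArg (fun x => Nat.testBit x 0) h
      simp only at h0
      rw [Nat.testBit_land, Nat.testBit_zero, Nat.testBit_zero] at h0
      rcases Nat.mod_two_eq_zero_or_one N with hN | hN <;>
        rcases Nat.mod_two_eq_zero_or_one M with hM | hM <;>
          simp [hN, hM] at h0 ⊢
    · apply Nat.eq_of_testBit_eq
      intro i
      have hi := congrArg (fun x => Nat.testBit x (i + 1)) h
      simp only at hi
      rw [Nat.testBit_land, Nat.testBit_add_one, Nat.testBit_add_one] at hi
      rw [Nat.testBit_land]
      exact hi
  · rintro ⟨h0, h1⟩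
    apply Nat.eq_of_testBit_eq
    intro i
    cases i with
    | zero =>
      rw [Nat.testBit_land, Nat.testBit_zero, Nat.testBit_zero]
      rcases Nat.mod_two_eq_zero_or_one N with hN | hN <;>
        rcases Nat.mod_two_eq_zero_or_one M with hM | hM <;>
          simp [hN, hM] <;> omega
    | succ i =>
      have hi := congrArg (fun x => Nat.testBit x i) h1
      simp only at hi
      rw [Nat.testBit_land] at hi
      rw [Nat.testBit_land, Nat.testBit_add_one, Nat.testBit_add_one]
      exact hi

theorem lucas_two (N M : Nat) :
    Nat.choose N M % 2 = (Nat.choose (N % 2) (M % 2) * Nat.choose (N / 2) (M / 2)) % 2 := by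
  haveI : Fact (Nat.Prime 2) := ⟨by norm_num⟩
  exact Choose.choose_modEq_choose_mod_mul_choose_div_nat

theorem lucas_five (N M : Nat) :
    Nat.choose N M % 5 = (Nat.choose (N % 5) (M % 5) * Nat.choose (N / 5) (M / 5)) % 5 := by
  haveI : Fact (Nat.Prime 5) := ⟨by norm_num⟩
  exact Choose.choose_modEq_choose_mod_mul_choose_div_nat

theorem go2 (S : Nat) : ∀ (N M : Nat), N + M ≤ S →
    (if N &&& M = M then (1 : Int) else 0) = ((Nat.choose N M % 2 : Nat) : Int) := by
  induction S with
  | zero =>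
    intro N M h
    have hN : N = 0 := by omega
    have hM : M = 0 := by omega
    subst hN; subst hM; decide
  | succ S ih =>
    intro N M h
    by_cases hz : N = 0 ∧ M = 0
    · obtain ⟨hN, hM⟩ := hz; subst hN; subst hM; decide
    · have hrec : N / 2 + M / 2 ≤ S := by omega
      have ihr := ih (N / 2) (M / 2) hrec
      rw [lucas_two N M]
      by_cases hb : M % 2 ≤ N % 2
      · have hc2 : Nat.choose (N % 2) (M % 2) = 1 := by
          have h2N : N % 2 < 2 := Nat.mod_lt _ (by norm_num)
          have h2M : M % 2 < 2 := Nat.mod_lt _ (by norm_num)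
          interval_cases hNv : N % 2 <;> interval_cases hMv : M % 2 <;> simp_all
        rw [hc2, one_mul]
        simp only [land_step N M]
        by_cases hr : N / 2 &&& M / 2 = M / 2
        · simp only [hb, hr, and_true, if_pos]
          rw [if_pos hr] at ihr
          simpa using ihr
        · simp only [hr, and_false, if_false]
          rw [if_neg hr] at ihr
          simpa using ihr
      · have hN0 : N % 2 = 0 := by omega
        have hM1 : M % 2 = 1 := by omega
        have hc2 : Nat.choose (N % 2) (M % 2) = 0 := by rw [hN0, hM1]; decide
        rw [hc2, zero_mul, Nat.zero_mod]
        rw [if_neg]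
        · simp
        · rw [land_step]
          intro hcon
          omega

theorem pvMod2_eq_choose_mod_two (N M : Nat) :
    pvMod2 (N : Int) (M : Int) = ((Nat.choose N M % 2 : Nat) : Int) := by
  unfold pvMod2
  rw [PySem.Int.band_natCast]
  simp only [Nat.cast_inj]
  exact go2 (N + M) N M le_rfl

-- the mod-5 Pascal table of A equals `choose a b % 5` for all digits a, b < 5
theorem table_eq (a b : Nat) (ha : a < 5) (hb : b < 5) :
    PySem.List.pyGetD (PySem.List.pyGetD pvMod5Table (a : Int) []) (b : Int) 0
      = ((Nat.choose a b % 5 : Nat) : Int) := by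
  interval_cases a <;> interval_cases b <;> decide

theorem go5 (S : Nat) : ∀ (N M r : Nat), N + M ≤ S → r < 5 →
    pvMod5Go (N : Int) (M : Int) (r : Int) = ((r * Nat.choose N M % 5 : Nat) : Int) := by
  induction S with
  | zero =>
    intro N M r h hr
    have hN : N = 0 := by omega
    have hM : M = 0 := by omega
    subst hN; subst hM
    rw [pvMod5Go]
    simp only [Nat.cast_zero, lt_irrefl, or_self, dif_neg, not_false_iff]
    simp [Nat.mod_eq_of_lt hr]
  | succ S ih =>
    intro N M r h hr
    by_cases hz : N = 0 ∧ M = 0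
    · obtain ⟨hN, hM⟩ := hz; subst hN; subst hM
      rw [pvMod5Go]
      simp only [Nat.cast_zero, lt_irrefl, or_self, dif_neg, not_false_iff]
      simp [Nat.mod_eq_of_lt hr]
    · have hguard : ((N : Int) > 0 ∨ (M : Int) > 0) := by
        rcases Nat.eq_zero_or_pos N with hN | hN
        · right; have : M ≠ 0 := fun hM => hz ⟨hN, hM⟩; exact_mod_cast Nat.pos_of_ne_zero this
        · left; exact_mod_cast hN
      rw [pvMod5Go, dif_pos hguard]
      have hmodN : PySem.Int.mod (N : Int) 5 = ((N % 5 : Nat) : Int) := PySem.Int.mod_natCast N 5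
      have hmodM : PySem.Int.mod (M : Int) 5 = ((M % 5 : Nat) : Int) := PySem.Int.mod_natCast M 5
      have hdivN : PySem.Int.floordiv (N : Int) 5 = ((N / 5 : Nat) : Int) := PySem.Int.floordiv_natCast N 5
      have hdivM : PySem.Int.floordiv (M : Int) 5 = ((M / 5 : Nat) : Int) := PySem.Int.floordiv_natCast M 5
      simp only [hmodN, hmodM, hdivN, hdivM]
      by_cases hlt : ((M % 5 : Nat) : Int) > ((N % 5 : Nat) : Int)
      · rw [if_pos hlt]
        have hlt' : N % 5 < M % 5 := by exact_mod_cast hlt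
        have hc0 : Nat.choose (N % 5) (M % 5) = 0 := Nat.choose_eq_zero_of_lt hlt'
        have : Nat.choose N M % 5 = 0 := by rw [lucas_five N M, hc0, zero_mul, Nat.zero_mod]
        rw [Nat.mul_mod, this]
        simp
      · rw [if_neg hlt]
        have h5N : N % 5 < 5 := Nat.mod_lt _ (by norm_num)
        have h5M : M % 5 < 5 := Nat.mod_lt _ (by norm_num)
        rw [table_eq (N % 5) (M % 5) h5N h5M]
        have hacc : PySem.Int.mod ((r : Int) * ((Nat.choose (N % 5) (M % 5) % 5 : Nat) : Int)) 5
            = (((r * (Nat.choose (N % 5) (M % 5) % 5)) % 5 : Nat) : Int) := by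
          rw [show ((r : Int) * ((Nat.choose (N % 5) (M % 5) % 5 : Nat) : Int))
              = (((r * (Nat.choose (N % 5) (M % 5) % 5) : Nat)) : Int) from by push_cast; ring]
          exact PySem.Int.mod_natCast _ 5
        rw [hacc]
        have hrec : N / 5 + M / 5 ≤ S := by omega
        rw [ih (N / 5) (M / 5) _ hrec (Nat.mod_lt _ (by norm_num))]
        congr 1
        -- pure Nat.ModEq arithmetic
        have lucas := lucas_five N M
        have e1 : (r * (Nat.choose (N % 5) (M % 5) % 5) % 5) * Nat.choose (N / 5) (M / 5)
            ≡ r * (Nat.choose (N % 5) (M % 5) % 5) * Nat.choose (N / 5) (M / 5) [MOD 5] :=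
          Nat.ModEq.mul_right _ (Nat.mod_modEq _ 5)
        have e2 : r * (Nat.choose (N % 5) (M % 5) % 5) * Nat.choose (N / 5) (M / 5)
            ≡ r * Nat.choose (N % 5) (M % 5) * Nat.choose (N / 5) (M / 5) [MOD 5] :=
          Nat.ModEq.mul_right _ (Nat.ModEq.mul_left _ (Nat.mod_modEq _ 5))
        have e3 : r * Nat.choose (N % 5) (M % 5) * Nat.choose (N / 5) (M / 5)
            ≡ r * Nat.choose N M [MOD 5] := by
          rw [mul_assoc]
          exact (Nat.ModEq.mul_left r lucas).symm
        exact (e1.trans e2).trans e3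

theorem pvMod5Go_eq_choose_mod_five (N M r : Nat) (hr : r < 5) :
    pvMod5Go (N : Int) (M : Int) (r : Int) = ((r * Nat.choose N M % 5 : Nat) : Int) :=
  go5 (N + M) N M r le_rfl hr

-- ===== VERDICT (by name: the statement is the Claim_ definition above) =====
theorem comb_mod10_spec : Claim_equal_comb_mod10 := by
  intro n m _
  unfold Spec_comb_mod10 comb_mod10 comb_mod10_alt
  by_cases hg : m < 0 ∨ m > n
  · simp [hg]
  · simp only [hg, if_false]
    by_cases hm0 : m = 0
    · simp [hm0]
    · simp only [hm0, if_false]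
      have hm : 0 < m := by omega
      have hn : 0 < n := by omega
      have hN : ((n.toNat : Int)) = n := Int.toNat_of_nonneg (by omega)
      have hM : ((m.toNat : Int)) = m := Int.toNat_of_nonneg (by omega)
      rw [← hN, ← hM]
      have h5 := pvMod5Go_eq_choose_mod_five n.toNat m.toNat 1 (by norm_num)
      rw [Nat.cast_one] at h5
      rw [pvMod5, pvMod2_eq_choose_mod_two, h5, Int.toNat_natCast, Int.toNat_natCast]
      simp only [Nat.one_mul]
      have h2 : (0:Int) < 2 := by norm_num
      have h10 : (0:Int) < 10 := by norm_num
      rw [PySem.Int.mod_eq_emod_of_pos h2, PySem.Int.mod_eq_emod_of_pos h10,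
        PySem.Int.mod_eq_emod_of_pos h10]
      omega
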